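-- pv_equiv track=rewrite | github.com/aszokalski/Logia | Etap 2/Logia17/Zad2.py | maksos
-- ===== SOURCE A (Python) =====
-- def maksos(x):
--     osiedla = []
--     osiedle = []
--     for i in range(len(x)):
--         osiedle.append(x[i])
--         if i + 1 < len(x) and x[i + 1] - x[i] > 3:
--             osiedla.append(len(osiedle))
--             osiedle = []
--         elif i + 1 == len(x):
--             if len(osiedle) > 0:
--                 osiedla.append(len(osiedle))
--             if x[0] <= 3:
--                 osiedla[0] += 1
--     return max(osiedla)
-- ===== SOURCE B (Python) =====
-- def maksos(x):
--     # staged computation: break positions -> boundary list -> consecutive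
--     # differences = cluster sizes; then the first-cluster adjustment and max.
--     breaks = [i for i in range(len(x) - 1) if x[i + 1] - x[i] > 3]
--     bounds = [-1] + breaks + [len(x) - 1]
--     sizes = [b - a for a, b in zip(bounds, bounds[1:])]
--     if x[0] <= 3:
--         sizes[0] += 1
--     return max(sizes)
-- ===== Notes on version B (the rewrite author's own statement) =====
-- stated objective: alternative
-- what changed: Replaces A's single-pass loop with mutable cluster/size accumulator lists and an end-of-loop special case by three staged comprehensions: collect the gap>3 break positions, form the boundary list (sentinel -1, the breaks, the last index) and take consecutive differences as the cluster sizes; then the first-cluster adjustment and max.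
-- outside the precondition, e.g. on maksos([]): A raises ValueError, B raises IndexError
import Mathlib
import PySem

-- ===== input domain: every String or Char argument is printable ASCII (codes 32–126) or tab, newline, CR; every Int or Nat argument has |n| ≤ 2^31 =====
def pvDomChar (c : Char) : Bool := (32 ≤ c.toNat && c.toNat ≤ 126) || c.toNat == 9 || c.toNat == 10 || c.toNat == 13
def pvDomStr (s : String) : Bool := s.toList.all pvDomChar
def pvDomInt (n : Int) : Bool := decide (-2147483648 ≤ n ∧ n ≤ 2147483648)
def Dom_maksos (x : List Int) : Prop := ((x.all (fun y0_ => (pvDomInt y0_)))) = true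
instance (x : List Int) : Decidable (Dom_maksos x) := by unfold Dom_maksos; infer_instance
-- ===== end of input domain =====

-- B replaces A's single-pass mutable-accumulator loop by staged comprehensions
-- (break positions -> boundary list -> consecutive differences); objective: alternative, same cost.
-- Both programs raise on the empty list (ValueError / IndexError); Pre_ excludes it.

-- ===== PORT A =====
-- osiedla[0] += 1 (osiedla provably nonempty at that point; [] case unreachable)
def pvBumpA : List Int → List Int
  | [] => []
  | c :: cs => (c + 1) :: cs

-- the 'for i in range(len(x))' loop over state (osiedla, osiedle); the non-empty tail case
-- is 'i + 1 < len(x)', the singleton case is 'i + 1 == len(x)'; x0 is x[0] (in range: x ≠ []).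
def pvLoopA (x0 : Int) : List Int → List Int → List Int → List Int
  | [], osiedla, _ => osiedla
  | [a], osiedla, osiedle =>
      let osiedle' := osiedle ++ [a]
      let osiedla' := if osiedle'.length > 0 then osiedla ++ [(osiedle'.length : Int)] else osiedla
      if x0 ≤ 3 then pvBumpA osiedla' else osiedla'
  | a :: b :: t, osiedla, osiedle =>
      let osiedle' := osiedle ++ [a]
      if b - a > 3 then pvLoopA x0 (b :: t) (osiedla ++ [(osiedle'.length : Int)]) []
      else pvLoopA x0 (b :: t) osiedla osiedle'

-- max(osiedla): first-max of the list; [] would be Python's ValueError (excluded by Pre_)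
def maksos (x : List Int) : Int :=
  match x with
  | [] => (PySem.List.max? ([] : List Int) (fun y => y)).getD 0
  | x0 :: _ => (PySem.List.max? (pvLoopA x0 x [] []) (fun y => y)).getD 0

-- ===== PORT B =====
-- '[i for i in range(len(x) - 1) if x[i + 1] - x[i] > 3]' : filter over pyRange (indices in range)
def pvBreaks (x : List Int) : List Int :=
  (PySem.List.pyRange 0 ((x.length : Int) - 1) 1).filter
    (fun i => decide (PySem.List.pyGetD x (i + 1) 0 - PySem.List.pyGetD x i 0 > 3))

def maksos_alt (x : List Int) : Int :=
  let breaks := pvBreaks x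
  let bounds := [(-1 : Int)] ++ breaks ++ [(x.length : Int) - 1]
  -- '[b - a for a, b in zip(bounds, bounds[1:])]'
  let sizes := (bounds.zip (PySem.List.slice bounds (some 1) none)).map (fun p => p.2 - p.1)
  -- 'if x[0] <= 3: sizes[0] += 1' (x[0] in range and sizes nonempty under Pre_)
  let sizes :=
    if PySem.List.pyGetD x 0 0 ≤ 3 then
      (match sizes with | [] => [] | s :: rest => (s + 1) :: rest)
    else sizes
  (PySem.List.max? sizes (fun y => y)).getD 0

-- ===== PRECONDITION & SPEC =====
-- A raises ValueError (max of the empty osiedla) on [], B raises IndexError (x[0]) there.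
def Pre_maksos (x : List Int) : Prop := x ≠ []
instance (x : List Int) : Decidable (Pre_maksos x) := by unfold Pre_maksos; infer_instance
def pvWitness_maksos : List Int := [1, 2, 9]

def Spec_maksos (x : List Int) (out : Int) : Prop := out = maksos_alt x
instance (x : List Int) (out : Int) : Decidable (Spec_maksos x out) := by unfold Spec_maksos; infer_instance

-- ===== CLAIM (what is proved, stated in full; the proofs are below) =====
def Claim_equal_maksos : Prop := ∀ (x : List Int), Dom_maksos x → Pre_maksos x → Spec_maksos x (maksos x)

-- ===== LEMMAS AND PROOFS =====

-- proof-only characterisation: the left-to-right cluster-size list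
def pvClusters : List Int → List Int
  | [] => []
  | [_] => [1]
  | a :: b :: t =>
      let cs := pvClusters (b :: t)
      if b - a > 3 then 1 :: cs
      else match cs with
           | [] => []
           | c :: rest => (c + 1) :: rest

-- add k to the head (current partial-cluster length folded into the first cluster size)
def pvBumpN (k : Nat) : List Int → List Int
  | [] => []
  | c :: cs => (c + (k : Int)) :: cs

theorem pvClusters_ne_nil (a : Int) (t : List Int) : pvClusters (a :: t) ≠ [] := by
  cases t with
  | nil => simp [pvClusters]
  | cons b u =>
    simp only [pvClusters]
    split
    · simp
    · cases h : pvClusters (b :: u) with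
      | nil => exact absurd h (pvClusters_ne_nil b u)
      | cons c rest => simp

theorem pvBumpN_zero (l : List Int) (h : l ≠ []) : pvBumpN 0 l = l := by
  cases l with
  | nil => exact absurd rfl h
  | cons c cs => simp [pvBumpN]

-- A's loop computes the (head-bumped) cluster-size list
theorem pvLoopA_eq (x0 a : Int) (t acc cur : List Int) :
    pvLoopA x0 (a :: t) acc cur =
      (if x0 ≤ 3 then pvBumpA (acc ++ pvBumpN cur.length (pvClusters (a :: t)))
       else acc ++ pvBumpN cur.length (pvClusters (a :: t))) := by
  induction t generalizing a acc cur with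
  | nil =>
    simp [pvLoopA, pvClusters, pvBumpN, Int.add_comm]
  | cons b u ih =>
    simp only [pvLoopA, pvClusters]
    split
    · rw [ih b (acc ++ [((cur ++ [a]).length : Int)]) []]
      have hne := pvClusters_ne_nil b u
      simp only [List.length_nil]
      rw [pvBumpN_zero _ hne]
      cases hcs : pvClusters (b :: u) with
      | nil => exact absurd hcs hne
      | cons c rest =>
        simp [List.append_assoc, pvBumpN, Int.add_comm]
    · rw [ih b acc (cur ++ [a])]
      cases hcs : pvClusters (b :: u) with
      | nil => exact absurd hcs (pvClusters_ne_nil b u)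
      | cons c rest =>
        have h2 : c + (((cur ++ [a]).length : Nat) : Int) = c + 1 + (cur.length : Int) := by
          simp only [List.length_append, List.length_cons, List.length_nil]
          push_cast
          ring
        simp only [pvBumpN, h2, Int.add_comm]

-- xs[j+1] on a cons peels the head for a nonnegative index
theorem pvGetD_cons_succ (a : Int) (rest : List Int) (j d : Int) (h : 0 ≤ j) :
    PySem.List.pyGetD (a :: rest) (j + 1) d = PySem.List.pyGetD rest j d := by
  obtain ⟨n, rfl⟩ := Int.eq_ofNat_of_zero_le h
  have h1 : (n : Int) + 1 = ((n + 1 : Nat) : Int) := by push_cast; ring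
  rw [h1, PySem.List.pyGetD_natCast, PySem.List.pyGetD_natCast]
  simp

-- range(1, m) is range(0, m-1) shifted by one
theorem pvRange_succ_map (m : Int) :
    PySem.List.pyRange 1 m 1 = (PySem.List.pyRange 0 (m - 1) 1).map (· + 1) := by
  rw [PySem.List.pyRange_one, PySem.List.pyRange_one, List.map_map]
  have h0 : (m - 1 - 0) = m - 1 := by ring
  rw [h0]
  congr 1
  funext k
  simp only [Function.comp_apply]
  ring

-- the break-position list peels off the head pair
theorem pvBreaks_cons (a b : Int) (t : List Int) :
    pvBreaks (a :: b :: t) =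
      (if b - a > 3 then 0 :: (pvBreaks (b :: t)).map (· + 1)
       else (pvBreaks (b :: t)).map (· + 1)) := by
  unfold pvBreaks
  have hlen : ((a :: b :: t).length : Int) - 1 = (t.length : Int) + 1 := by
    simp
  have hlen2 : ((b :: t).length : Int) - 1 = (t.length : Int) := by simp
  rw [hlen, hlen2]
  rw [PySem.List.pyRange_one_cons (by omega)]
  simp only [zero_add]
  have hshift : PySem.List.pyRange 1 ((t.length : Int) + 1) 1
      = (PySem.List.pyRange 0 (t.length : Int) 1).map (· + 1) := by
    have := pvRange_succ_map ((t.length : Int) + 1)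
    simpa using this
  rw [hshift]
  rw [List.filter_cons]
  have hget0 : PySem.List.pyGetD (a :: b :: t) 0 0 = a := PySem.List.pyGetD_zero_cons _ _ _
  have hget1 : PySem.List.pyGetD (a :: b :: t) 1 0 = b := by
    have := pvGetD_cons_succ a (b :: t) 0 0 le_rfl
    simpa [PySem.List.pyGetD_zero_cons] using this
  have hfil : ((PySem.List.pyRange 0 (t.length : Int) 1).map (· + 1)).filter
        (fun i => decide (PySem.List.pyGetD (a :: b :: t) (i + 1) 0 - PySem.List.pyGetD (a :: b :: t) i 0 > 3))
      = ((PySem.List.pyRange 0 (t.length : Int) 1).filter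
        (fun i => decide (PySem.List.pyGetD (b :: t) (i + 1) 0 - PySem.List.pyGetD (b :: t) i 0 > 3))).map (· + 1) := by
    rw [List.filter_map]
    congr 1
    apply List.filter_congr
    intro i hi
    have h0i : 0 ≤ i := ((PySem.List.mem_pyRange_one).mp hi).1
    simp only [Function.comp]
    rw [pvGetD_cons_succ a (b :: t) (i + 1) 0 (by omega),
        pvGetD_cons_succ a (b :: t) i 0 h0i]
  simp only [zero_add, hget0, hget1, hfil]
  split
  · simp_all
  · simp_all

-- consecutive differences
def pvDif (l : List Int) : List Int := (l.zip l.tail).map (fun p => p.2 - p.1)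

theorem pvDif_cons2 (a b : Int) (t : List Int) :
    pvDif (a :: b :: t) = (b - a) :: pvDif (b :: t) := rfl

theorem pvDif_map (l : List Int) : pvDif (l.map (· + 1)) = pvDif l := by
  induction l with
  | nil => rfl
  | cons a t ih =>
    cases t with
    | nil => rfl
    | cons b u =>
      simp only [List.map_cons] at ih ⊢
      rw [pvDif_cons2, pvDif_cons2, ih]
      ring_nf

-- boundary differences are exactly the cluster sizes
theorem pvSizes_eq (a : Int) (t : List Int) :
    pvDif ((-1 : Int) :: (pvBreaks (a :: t) ++ [((a :: t).length : Int) - 1]))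
      = pvClusters (a :: t) := by
  induction t generalizing a with
  | nil =>
    have h0 : pvBreaks [a] = [] := by
      unfold pvBreaks
      simp [PySem.List.pyRange_one_eq_nil]
    simp [h0, pvDif, pvClusters]
  | cons b t ih =>
    rw [pvBreaks_cons]
    have hlen : ((a :: b :: t).length : Int) - 1 = (((b :: t).length : Int) - 1) + 1 := by
      simp
    rw [hlen]
    have hmap : ((pvBreaks (b :: t)).map (· + 1)) ++ [(((b :: t).length : Int) - 1) + 1]
        = (pvBreaks (b :: t) ++ [((b :: t).length : Int) - 1]).map (· + 1) := by
      simp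
    split
    · -- gap: sizes = 1 :: cluster sizes of (b :: t)
      show pvDif ((-1 : Int) :: 0 :: (((pvBreaks (b :: t)).map (· + 1)) ++ [(((b :: t).length : Int) - 1) + 1]))
        = pvClusters (a :: b :: t)
      rw [hmap, pvDif_cons2]
      have hc : (0 : Int) :: ((pvBreaks (b :: t) ++ [((b :: t).length : Int) - 1]).map (· + 1))
          = (((-1 : Int)) :: (pvBreaks (b :: t) ++ [((b :: t).length : Int) - 1])).map (· + 1) := by
        simp
      rw [hc, pvDif_map, ih b]
      simp only [pvClusters]
      rw [if_pos (by assumption)]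
      norm_num
    · -- no gap: head size grows by one
      show pvDif ((-1 : Int) :: (((pvBreaks (b :: t)).map (· + 1)) ++ [(((b :: t).length : Int) - 1) + 1]))
        = pvClusters (a :: b :: t)
      rw [hmap]
      have hih := ih b
      cases hl : pvBreaks (b :: t) ++ [((b :: t).length : Int) - 1] with
      | nil => simp at hl
      | cons c r =>
        rw [hl] at hih
        simp only [List.map_cons]
        rw [pvDif_cons2]
        have h2 : pvDif ((c + 1) :: r.map (· + 1)) = pvDif (c :: r) := by
          have := pvDif_map (c :: r)
          simpa using this
        rw [h2]
        rw [pvDif_cons2] at hih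
        simp only [pvClusters]
        rw [if_neg (by assumption)]
        cases hcs : pvClusters (b :: t) with
        | nil => exact absurd hcs (pvClusters_ne_nil b t)
        | cons c0 rest =>
          rw [hcs] at hih
          have hhd : c - (-1) = c0 := by
            have := congrArg (List.headD · 0) hih
            simpa using this
          have htl : pvDif (c :: r) = rest := by
            have := congrArg List.tail hih
            simpa using this
          simp only [List.cons.injEq]
          exact ⟨by omega, htl⟩

-- B's result in terms of pvClusters
theorem maksos_alt_eq (x0 : Int) (t : List Int) :
    maksos_alt (x0 :: t) =
      (PySem.List.max? (if x0 ≤ 3 then pvBumpA (pvClusters (x0 :: t)) else pvClusters (x0 :: t))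
        (fun y => y)).getD 0 := by
  unfold maksos_alt
  simp only [PySem.List.slice_from_one, PySem.List.pyGetD_zero_cons]
  have hsz := pvSizes_eq x0 t
  unfold pvDif at hsz
  simp only [List.cons_append, List.nil_append] at hsz ⊢
  rw [hsz]
  cases hcs : pvClusters (x0 :: t) with
  | nil => exact absurd hcs (pvClusters_ne_nil x0 t)
  | cons c rest =>
    simp only [pvBumpA]

-- ===== VERDICT (by name: the statement is the Claim_ definition above) =====
theorem maksos_spec : Claim_equal_maksos := by
  intro x _ hpre
  cases x with
  | nil => exact absurd rfl hpre
  | cons x0 t =>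
    show maksos (x0 :: t) = maksos_alt (x0 :: t)
    simp only [maksos]
    rw [pvLoopA_eq]
    simp only [List.length_nil]
    rw [pvBumpN_zero _ (pvClusters_ne_nil x0 t)]
    rw [maksos_alt_eq]
    simp only [List.nil_append]
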